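-- pv_equiv track=rewrite | github.com/kuveee/CTDL1 | tuan5/chuong5/bai5_3.py | solve_expression
-- ===== SOURCE A (Python) =====
-- def solve_expression(expression, sign_multiplier):
--     output_expression = ""  # Chuỗi kết quả sau khi loại bỏ ngoặc
--     i = 0
--
--     while i < len(expression):
--         char_at_i = expression[i]
--
--         if char_at_i.isalpha():
--             # Nếu là toán hạng (ký tự chữ cái), thêm trực tiếp vào kết quả
--             output_expression += char_at_i
--         elif char_at_i == '+':
--             # Nếu là dấu '+', thêm '+' hoặc '-' vào kết quả tùy thuộc vào sign_multiplier
--             output_expression += '+' if sign_multiplier == 1 else '-'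
--         elif char_at_i == '-':
--             # Nếu là dấu '-', thêm '-' hoặc '+' vào kết quả tùy thuộc vào sign_multiplier
--             output_expression += '-' if sign_multiplier == 1 else '+'
--         elif char_at_i == '(':
--             # Nếu là dấu '(', bắt đầu xử lý biểu thức con bên trong ngoặc
--             start_index = i
--             balance = 1
--             i += 1  # Bắt đầu từ vị trí sau dấu '('
--
--             while balance > 0:
--                 if expression[i] == '(':
--                     balance += 1  # Nếu gặp '(', tăng balance
--                 elif expression[i] == ')':
--                     balance -= 1  # Nếu gặp ')', giảm balance
--                 i += 1  # Tiếp tục duyệt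
--
--             end_index = i - 1  # Vị trí dấu ')' đóng ngoặc
--             substring_inside = expression[start_index + 1:end_index]  # Lấy chuỗi con bên trong ngoặc
--             inner_result = solve_expression(substring_inside, -sign_multiplier)  # Đệ quy để xử lý biểu thức con
--             output_expression += inner_result  # Thêm kết quả của biểu thức con vào kết quả chung
--             i -= 1  # Điều chỉnh i để vòng lặp tiếp tục đúng vị trí sau dấu ')' đã xử lý
--         # Không cần xử lý ')' ở mức này vì nó đã được xử lý trong đoạn trên
--         i += 1
--
--     return output_expression
-- ===== SOURCE B (Python) =====
-- def solve_expression(expression, sign_multiplier):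
--     out = []
--     depth = 0
--     for ch in expression:
--         if ch.isalpha():
--             out.append(ch)
--         elif ch == '+' or ch == '-':
--             eff = sign_multiplier if depth % 2 == 0 else -sign_multiplier
--             if eff == 1:
--                 out.append(ch)
--             else:
--                 out.append('-' if ch == '+' else '+')
--         elif ch == '(':
--             depth += 1
--         elif ch == ')':
--             if depth > 0:
--                 depth -= 1
--     return ''.join(out)
-- ===== Notes on version B (the rewrite author's own statement) =====
-- stated objective: faster
-- what changed: A recursively rescans and slices out each parenthesised group (re-solving the substring with a flipped multiplier); B makes a single pass over the characters, tracking the nesting depth and emitting each operator flipped according to whether the multiplier at that depth is 1.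
import Mathlib
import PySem

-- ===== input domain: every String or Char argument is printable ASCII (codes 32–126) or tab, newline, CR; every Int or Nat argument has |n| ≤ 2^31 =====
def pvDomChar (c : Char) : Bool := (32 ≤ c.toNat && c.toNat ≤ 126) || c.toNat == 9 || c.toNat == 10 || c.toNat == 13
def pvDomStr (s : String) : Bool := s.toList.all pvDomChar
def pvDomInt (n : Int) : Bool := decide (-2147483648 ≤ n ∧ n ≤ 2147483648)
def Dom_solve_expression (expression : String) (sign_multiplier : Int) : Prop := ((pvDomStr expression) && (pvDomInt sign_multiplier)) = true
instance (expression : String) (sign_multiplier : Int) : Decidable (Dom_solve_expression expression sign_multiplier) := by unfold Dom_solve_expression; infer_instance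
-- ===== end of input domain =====

-- B replaces A's recursive parenthesis-group scanning/slicing by a single pass over the
-- characters that tracks the nesting depth; equivalence is about the return value (no mutation).

-- ===== PORT A =====
-- A's inner `while balance > 0` scan: returns Python's `i` just after the matching ')' once
-- balance reaches 0, or none exactly where Python's expression[i] raises IndexError (i = len).
def pvFindClose (cs : List Char) (i : Nat) (balance : Nat) : Option Nat :=
  if balance = 0 then some i
  else if hlt : i < cs.length then
    let c := cs[i]
    pvFindClose cs (i + 1)
      (if c = '(' then balance + 1 else if c = ')' then balance - 1 else balance)
  else none      -- Python raises IndexError here (excluded by Pre_)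
termination_by cs.length - i

-- A's outer `while i < len(expression)` loop; the extra fuel argument only makes the index loop
-- structural (fuel = cs.length at the top call always suffices, see pvRunA_eq below).
def pvRunA (cs : List Char) (sign : Int) (i : Nat) (acc : List Char) : Nat → List Char
  | 0 => acc
  | fuel + 1 =>
    match cs[i]? with
    | none => acc
    | some c =>
      if PySem.Chars.isalpha c then
        pvRunA cs sign (i + 1) (acc ++ [c]) fuel
      else if c = '+' then
        pvRunA cs sign (i + 1) (acc ++ [if sign == 1 then '+' else '-']) fuel
      else if c = '-' then
        pvRunA cs sign (i + 1) (acc ++ [if sign == 1 then '-' else '+']) fuel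
      else if c = '(' then
        match pvFindClose cs (i + 1) 1 with
        | none => acc     -- Python raises IndexError here (excluded by Pre_)
        | some j =>
          let endIndex := j - 1
          let sub := PySem.List.slice cs (some ((i : Int) + 1)) (some (endIndex : Int))
          let inner := pvRunA sub (-sign) 0 [] fuel
          pvRunA cs sign (endIndex + 1) (acc ++ inner) fuel
      else
        pvRunA cs sign (i + 1) acc fuel

def solve_expression (expression : String) (sign_multiplier : Int) : String :=
  String.mk (pvRunA expression.toList sign_multiplier 0 [] expression.toList.length)

-- ===== PORT B =====
-- B's loop body: one character, state = (output chars, current nesting depth).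
def pvStepB (sign : Int) (st : List Char × Nat) (ch : Char) : List Char × Nat :=
  if PySem.Chars.isalpha ch then (st.1 ++ [ch], st.2)
  else if ch = '+' || ch = '-' then
    let eff : Int := if st.2 % 2 = 0 then sign else -sign
    if eff == 1 then (st.1 ++ [ch], st.2)
    else (st.1 ++ [if ch = '-' then '+' else '-'], st.2)
  else if ch = '(' then (st.1, st.2 + 1)
  else if ch = ')' then (st.1, if 0 < st.2 then st.2 - 1 else st.2)
  else st

def solve_expression_alt (expression : String) (sign_multiplier : Int) : String :=
  String.mk (expression.toList.foldl (pvStepB sign_multiplier) ([], 0)).1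

-- ===== PRECONDITION & SPEC =====
-- running parenthesis depth, where an unmatched ')' is ignored (clamped at 0)
def pvClamp : List Char → Nat → Nat
  | [], d => d
  | c :: t, d =>
      pvClamp t (if c = '(' then d + 1 else if c = ')' then (if 0 < d then d - 1 else d) else d)

-- Pre_ excludes exactly the inputs with an unclosed '(', on which A's inner scan raises IndexError.
def Pre_solve_expression (expression : String) (sign_multiplier : Int) : Prop :=
  pvClamp expression.toList 0 = 0
instance (expression : String) (sign_multiplier : Int) : Decidable (Pre_solve_expression expression sign_multiplier) := by unfold Pre_solve_expression; infer_instance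

def pvWitness_solve_expression : String × Int := ("a+(b-c)*(d-(e+f))", 1)

def Spec_solve_expression (expression : String) (sign_multiplier : Int) (out : String) : Prop := out = solve_expression_alt expression sign_multiplier
instance (expression : String) (sign_multiplier : Int) (out : String) : Decidable (Spec_solve_expression expression sign_multiplier out) := by unfold Spec_solve_expression; infer_instance

-- ===== CLAIM (what is proved, stated in full; the proofs are below) =====
def Claim_equal_solve_expression : Prop := ∀ (expression : String) (sign_multiplier : Int), Dom_solve_expression expression sign_multiplier → Pre_solve_expression expression sign_multiplier → Spec_solve_expression expression sign_multiplier (solve_expression expression sign_multiplier)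

-- ===== LEMMAS AND PROOFS =====

theorem pvAlpha_ne {c : Char} (h : PySem.Chars.isalpha c = true) :
    c ≠ '(' ∧ c ≠ ')' ∧ c ≠ '+' ∧ c ≠ '-' := by
  refine ⟨?_, ?_, ?_, ?_⟩ <;> rintro rfl <;> exact absurd h (by decide)

-- characters B appends while scanning l from depth d (mirrors pvStepB's branches)
def pvEmit (s : Int) : List Char → Nat → List Char
  | [], _ => []
  | c :: t, d =>
    if PySem.Chars.isalpha c then c :: pvEmit s t d
    else if c = '+' || c = '-' then
      (if (if d % 2 = 0 then s else -s) == 1 then c else if c = '-' then '+' else '-') :: pvEmit s t d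
    else if c = '(' then pvEmit s t (d + 1)
    else if c = ')' then pvEmit s t (if 0 < d then d - 1 else d)
    else pvEmit s t d

-- step lemmas for the five kinds of characters
theorem pvEmit_alpha {c : Char} (h : PySem.Chars.isalpha c = true) (s : Int) (t : List Char) (d : Nat) :
    pvEmit s (c :: t) d = c :: pvEmit s t d := by simp [pvEmit, h]

theorem pvEmit_plus (s : Int) (t : List Char) (d : Nat) :
    pvEmit s ('+' :: t) d = (if (if d % 2 = 0 then s else -s) == 1 then '+' else '-') :: pvEmit s t d := by
  simp [pvEmit, show PySem.Chars.isalpha '+' = false from by decide]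

theorem pvEmit_minus (s : Int) (t : List Char) (d : Nat) :
    pvEmit s ('-' :: t) d = (if (if d % 2 = 0 then s else -s) == 1 then '-' else '+') :: pvEmit s t d := by
  simp [pvEmit, show PySem.Chars.isalpha '-' = false from by decide]

theorem pvEmit_lparen (s : Int) (t : List Char) (d : Nat) :
    pvEmit s ('(' :: t) d = pvEmit s t (d + 1) := by
  simp [pvEmit, show PySem.Chars.isalpha '(' = false from by decide]

theorem pvEmit_rparen (s : Int) (t : List Char) (d : Nat) :
    pvEmit s (')' :: t) d = pvEmit s t (if 0 < d then d - 1 else d) := by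
  simp [pvEmit, show PySem.Chars.isalpha ')' = false from by decide]

theorem pvEmit_other {c : Char} (h1 : PySem.Chars.isalpha c = false) (h2 : c ≠ '+') (h3 : c ≠ '-')
    (h4 : c ≠ '(') (h5 : c ≠ ')') (s : Int) (t : List Char) (d : Nat) :
    pvEmit s (c :: t) d = pvEmit s t d := by simp [pvEmit, h1, h2, h3, h4, h5]

theorem pvClamp_lparen (t : List Char) (d : Nat) : pvClamp ('(' :: t) d = pvClamp t (d + 1) := by
  simp [pvClamp]

theorem pvClamp_rparen (t : List Char) (d : Nat) :
    pvClamp (')' :: t) d = pvClamp t (if 0 < d then d - 1 else d) := by simp [pvClamp]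

theorem pvClamp_other {c : Char} (h4 : c ≠ '(') (h5 : c ≠ ')') (t : List Char) (d : Nat) :
    pvClamp (c :: t) d = pvClamp t d := by simp [pvClamp, h4, h5]

-- step lemmas for pvStepB
theorem pvStepB_alpha {c : Char} (h : PySem.Chars.isalpha c = true) (s : Int) (st : List Char × Nat) :
    pvStepB s st c = (st.1 ++ [c], st.2) := by simp [pvStepB, h]

theorem pvStepB_plus (s : Int) (st : List Char × Nat) :
    pvStepB s st '+' = (st.1 ++ [if (if st.2 % 2 = 0 then s else -s) == 1 then '+' else '-'], st.2) := by
  by_cases he : ((if st.2 % 2 = 0 then s else -s) == 1) = true <;>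
    simp [pvStepB, he, show PySem.Chars.isalpha '+' = false from by decide]

theorem pvStepB_minus (s : Int) (st : List Char × Nat) :
    pvStepB s st '-' = (st.1 ++ [if (if st.2 % 2 = 0 then s else -s) == 1 then '-' else '+'], st.2) := by
  by_cases he : ((if st.2 % 2 = 0 then s else -s) == 1) = true <;>
    simp [pvStepB, he, show PySem.Chars.isalpha '-' = false from by decide]

theorem pvStepB_lparen (s : Int) (st : List Char × Nat) :
    pvStepB s st '(' = (st.1, st.2 + 1) := by
  simp [pvStepB, show PySem.Chars.isalpha '(' = false from by decide]

theorem pvStepB_rparen (s : Int) (st : List Char × Nat) :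
    pvStepB s st ')' = (st.1, if 0 < st.2 then st.2 - 1 else st.2) := by
  simp [pvStepB, show PySem.Chars.isalpha ')' = false from by decide]

theorem pvStepB_other {c : Char} (h1 : PySem.Chars.isalpha c = false) (h2 : c ≠ '+') (h3 : c ≠ '-')
    (h4 : c ≠ '(') (h5 : c ≠ ')') (s : Int) (st : List Char × Nat) :
    pvStepB s st c = st := by simp [pvStepB, h1, h2, h3, h4, h5]

-- B's fold = append pvEmit, final depth = pvClamp
theorem pvFoldB_eq (s : Int) : ∀ (l : List Char) (out : List Char) (d : Nat),
    l.foldl (pvStepB s) (out, d) = (out ++ pvEmit s l d, pvClamp l d) := by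
  intro l
  induction l with
  | nil => intro out d; simp [pvEmit, pvClamp]
  | cons c t ih =>
    intro out d
    rw [List.foldl_cons]
    by_cases ha : PySem.Chars.isalpha c = true
    · obtain ⟨p1, p2, _, _⟩ := pvAlpha_ne ha
      rw [pvStepB_alpha ha, pvEmit_alpha ha, pvClamp_other p1 p2, ih]
      simp
    · rw [Bool.not_eq_true] at ha
      by_cases h3 : c = '+'
      · subst h3
        rw [pvStepB_plus, pvEmit_plus, pvClamp_other (by decide) (by decide), ih]
        simp
      · by_cases h4 : c = '-'
        · subst h4
          rw [pvStepB_minus, pvEmit_minus, pvClamp_other (by decide) (by decide), ih]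
          simp
        · by_cases h1 : c = '('
          · subst h1
            rw [pvStepB_lparen, pvEmit_lparen, pvClamp_lparen, ih]
          · by_cases h2 : c = ')'
            · subst h2
              rw [pvStepB_rparen, pvEmit_rparen, pvClamp_rparen, ih]
            · rw [pvStepB_other ha h3 h4 h1 h2, pvEmit_other ha h3 h4 h1 h2, pvClamp_other h1 h2, ih]

-- `pvCloses l b` : scanning l from exact balance b never underflows and ends at balance 0
def pvCloses : List Char → Nat → Bool
  | [], b => b == 0
  | c :: t, b =>
      if c = '(' then pvCloses t (b + 1)
      else if c = ')' then decide (0 < b) && pvCloses t (b - 1)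
      else pvCloses t b

theorem pvCloses_other {c : Char} (h4 : c ≠ '(') (h5 : c ≠ ')') (t : List Char) (b : Nat) :
    pvCloses (c :: t) b = pvCloses t b := by simp [pvCloses, h4, h5]

theorem pvCloses_rparen (t : List Char) (b : Nat) :
    pvCloses (')' :: t) b = true ↔ 0 < b ∧ pvCloses t (b - 1) = true := by simp [pvCloses]

theorem pvClamp_zero_of_closes : ∀ (l : List Char) (b : Nat), pvCloses l b = true → pvClamp l b = 0 := by
  intro l
  induction l with
  | nil => intro b h; simpa [pvCloses, pvClamp] using h
  | cons c t ih =>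
    intro b h
    by_cases h1 : c = '('
    · subst h1
      rw [pvClamp_lparen]
      exact ih _ (by simpa [pvCloses] using h)
    · by_cases h2 : c = ')'
      · subst h2
        rw [pvClamp_rparen]
        rw [pvCloses_rparen] at h
        rw [if_pos h.1]
        exact ih _ h.2
      · rw [pvClamp_other h1 h2]
        exact ih _ (by rwa [pvCloses_other h1 h2] at h)

theorem pvClamp_group : ∀ (mid : List Char) (b : Nat) (rest : List Char),
    pvCloses mid b = true → pvClamp (mid ++ ')' :: rest) (b + 1) = pvClamp rest 0 := by
  intro mid
  induction mid with
  | nil =>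
    intro b rest h
    simp only [pvCloses, beq_iff_eq] at h
    subst h
    rw [List.nil_append, pvClamp_rparen]
    simp
  | cons c t ih =>
    intro b rest h
    rw [List.cons_append]
    by_cases h1 : c = '('
    · subst h1
      rw [pvClamp_lparen]
      exact ih (b + 1) rest (by simpa [pvCloses] using h)
    · by_cases h2 : c = ')'
      · subst h2
        rw [pvClamp_rparen, if_pos (Nat.succ_pos b)]
        rw [pvCloses_rparen] at h
        rw [show b + 1 - 1 = (b - 1) + 1 by omega]
        exact ih (b - 1) rest h.2
      · rw [pvClamp_other h1 h2]
        exact ih b rest (by rwa [pvCloses_other h1 h2] at h)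

-- the sign seen at depth b+1 with multiplier s is the sign seen at depth b with multiplier -s
theorem pvEff_succ (s : Int) (b : Nat) :
    (if (b + 1) % 2 = 0 then s else -s) = (if b % 2 = 0 then -s else s) := by
  rcases Nat.mod_two_eq_zero_or_one b with h | h
  · have h1 : (b + 1) % 2 = 1 := by omega
    rw [h1, h]; norm_num
  · have h1 : (b + 1) % 2 = 0 := by omega
    rw [h1, h]; norm_num

theorem pvEmit_group (s : Int) : ∀ (mid : List Char) (b : Nat) (rest : List Char),
    pvCloses mid b = true →
    pvEmit s (mid ++ ')' :: rest) (b + 1) = pvEmit (-s) mid b ++ pvEmit s rest 0 := by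
  intro mid
  induction mid with
  | nil =>
    intro b rest h
    simp only [pvCloses, beq_iff_eq] at h
    subst h
    rw [List.nil_append, pvEmit_rparen, if_pos (Nat.succ_pos 0)]
    simp [pvEmit]
  | cons c t ih =>
    intro b rest h
    rw [List.cons_append]
    by_cases ha : PySem.Chars.isalpha c = true
    · obtain ⟨p1, p2, _, _⟩ := pvAlpha_ne ha
      rw [pvEmit_alpha ha, pvEmit_alpha ha, List.cons_append]
      rw [ih b rest (by rwa [pvCloses_other p1 p2] at h)]
    · rw [Bool.not_eq_true] at ha
      by_cases h3 : c = '+'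
      · subst h3
        rw [pvEmit_plus, pvEmit_plus, pvEff_succ, neg_neg, List.cons_append]
        rw [ih b rest (by rwa [pvCloses_other (by decide) (by decide)] at h)]
      · by_cases h4 : c = '-'
        · subst h4
          rw [pvEmit_minus, pvEmit_minus, pvEff_succ, neg_neg, List.cons_append]
          rw [ih b rest (by rwa [pvCloses_other (by decide) (by decide)] at h)]
        · by_cases h1 : c = '('
          · subst h1
            rw [pvEmit_lparen, pvEmit_lparen]
            exact ih (b + 1) rest (by simpa [pvCloses] using h)
          · by_cases h2 : c = ')'
            · subst h2
              rw [pvCloses_rparen] at h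
              rw [pvEmit_rparen, if_pos (Nat.succ_pos b), pvEmit_rparen, if_pos h.1]
              rw [show b + 1 - 1 = (b - 1) + 1 by omega]
              exact ih (b - 1) rest h.2
            · rw [pvEmit_other ha h3 h4 h1 h2, pvEmit_other ha h3 h4 h1 h2]
              exact ih b rest (by rwa [pvCloses_other h1 h2] at h)

-- drop decomposition helper
theorem pvDrop_cons {cs : List Char} {i : Nat} {c : Char} {t : List Char}
    (h : cs.drop i = c :: t) : cs[i]? = some c ∧ cs.drop (i + 1) = t := by
  constructor
  · have h0 : (cs.drop i)[0]? = some c := by rw [h]; rfl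
    simpa [List.getElem?_drop] using h0
  · have h1 : (cs.drop i).drop 1 = t := by rw [h]; rfl
    rwa [List.drop_drop] at h1

-- findClose succeeds on a suffix whose clamped depth from b (> 0) is 0, and splits it
theorem pvFindClose_spec : ∀ (t : List Char) (b i : Nat) (cs : List Char),
    cs.drop i = t → 0 < b → pvClamp t b = 0 →
    ∃ mid rest, t = mid ++ ')' :: rest ∧ pvCloses mid (b - 1) = true ∧
      pvFindClose cs i b = some (i + mid.length + 1) ∧
      cs.drop (i + mid.length + 1) = rest := by
  intro t
  induction t with
  | nil =>
    intro b i cs hdrop hb hc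
    simp only [pvClamp] at hc
    omega
  | cons c t' ih =>
    intro b i cs hdrop hb hc
    obtain ⟨hget, hdrop'⟩ := pvDrop_cons hdrop
    have hi : i < cs.length := (List.getElem?_eq_some_iff.mp hget).1
    have hval : cs[i] = c := (List.getElem?_eq_some_iff.mp hget).2
    rw [pvFindClose, if_neg (by omega), dif_pos hi]
    simp only [hval]
    by_cases h1 : c = '('
    · subst h1
      rw [pvClamp_lparen] at hc
      rw [if_pos rfl]
      obtain ⟨mid', rest, ht', hcl, hfc, hdr⟩ := ih (b + 1) (i + 1) cs hdrop' (by omega) hc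
      refine ⟨'(' :: mid', rest, by simp [ht'], ?_, ?_, ?_⟩
      · simpa [pvCloses, show b + 1 - 1 = (b - 1) + 1 by omega] using hcl
      · rw [show i + ('(' :: mid').length + 1 = i + 1 + mid'.length + 1 by simp; omega]
        exact hfc
      · rw [show i + ('(' :: mid').length + 1 = i + 1 + mid'.length + 1 by simp; omega]
        exact hdr
    · by_cases h2 : c = ')'
      · subst h2
        rw [pvClamp_rparen, if_pos hb] at hc
        rw [if_neg (by decide), if_pos rfl]
        by_cases hb1 : b = 1
        · subst hb1
          refine ⟨[], t', rfl, by simp [pvCloses], ?_, by simpa using hdrop'⟩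
          rw [pvFindClose]
          simp
        · obtain ⟨mid', rest, ht', hcl, hfc, hdr⟩ := ih (b - 1) (i + 1) cs hdrop' (by omega) hc
          refine ⟨')' :: mid', rest, by simp [ht'], ?_, ?_, ?_⟩
          · rw [pvCloses_rparen]
            exact ⟨by omega, hcl⟩
          · rw [show i + (')' :: mid').length + 1 = i + 1 + mid'.length + 1 by simp; omega]
            exact hfc
          · rw [show i + (')' :: mid').length + 1 = i + 1 + mid'.length + 1 by simp; omega]
            exact hdr
      · rw [pvClamp_other h1 h2] at hc
        rw [if_neg h1, if_neg h2]
        obtain ⟨mid', rest, ht', hcl, hfc, hdr⟩ := ih b (i + 1) cs hdrop' hb hc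
        refine ⟨c :: mid', rest, by simp [ht'], ?_, ?_, ?_⟩
        · rwa [pvCloses_other h1 h2]
        · rw [show i + (c :: mid').length + 1 = i + 1 + mid'.length + 1 by simp; omega]
          exact hfc
        · rw [show i + (c :: mid').length + 1 = i + 1 + mid'.length + 1 by simp; omega]
          exact hdr

-- main invariant: with enough fuel and a clamp-balanced suffix, A's loop appends pvEmit
theorem pvRunA_eq : ∀ (fuel : Nat) (cs : List Char) (s : Int) (i : Nat) (acc : List Char),
    cs.length - i ≤ fuel → pvClamp (cs.drop i) 0 = 0 →
    pvRunA cs s i acc fuel = acc ++ pvEmit s (cs.drop i) 0 := by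
  intro fuel
  induction fuel with
  | zero =>
    intro cs s i acc hf hc
    have hnil : cs.drop i = [] := List.drop_eq_nil_of_le (by omega)
    simp [pvRunA, hnil, pvEmit]
  | succ m ih =>
    intro cs s i acc hf hc
    match hget : cs[i]? with
    | none =>
      have hlen : cs.length ≤ i := by
        by_contra hlt
        rw [List.getElem?_eq_getElem (by omega)] at hget
        cases hget
      have hnil : cs.drop i = [] := List.drop_eq_nil_of_le hlen
      simp [pvRunA, hget, hnil, pvEmit]
    | some c =>
      have hi : i < cs.length := (List.getElem?_eq_some_iff.mp hget).1
      have hdrop : cs.drop i = c :: cs.drop (i + 1) := by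
        rw [List.drop_eq_getElem_cons hi]
        exact congrArg (· :: cs.drop (i + 1)) ((List.getElem?_eq_some_iff.mp hget).2)
      rw [hdrop] at hc ⊢
      simp only [pvRunA, hget]
      by_cases ha : PySem.Chars.isalpha c = true
      · obtain ⟨p1, p2, _, _⟩ := pvAlpha_ne ha
        rw [if_pos ha, pvEmit_alpha ha]
        rw [pvClamp_other p1 p2] at hc
        rw [ih cs s (i + 1) (acc ++ [c]) (by omega) hc]
        simp
      · rw [Bool.not_eq_true] at ha
        rw [if_neg (by simp [ha])]
        by_cases h3 : c = '+'
        · subst h3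
          rw [if_pos rfl, pvEmit_plus]
          rw [pvClamp_other (by decide) (by decide)] at hc
          rw [ih cs s (i + 1) _ (by omega) hc]
          simp
        · rw [if_neg h3]
          by_cases h4 : c = '-'
          · subst h4
            rw [if_pos rfl, pvEmit_minus]
            rw [pvClamp_other (by decide) (by decide)] at hc
            rw [ih cs s (i + 1) _ (by omega) hc]
            simp
          · rw [if_neg h4]
            by_cases h1 : c = '('
            · subst h1
              rw [if_pos rfl]
              rw [pvClamp_lparen] at hc
              obtain ⟨mid, rest, hsplit, hcl, hfc, hdr⟩ :=
                pvFindClose_spec (cs.drop (i + 1)) 1 (i + 1) cs rfl (by omega) hc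
              have hcl0 : pvCloses mid 0 = true := hcl
              rw [hfc]
              show pvRunA cs s (i + 1 + mid.length + 1 - 1 + 1)
                  (acc ++ pvRunA (PySem.List.slice cs (some ((i : Int) + 1)) (some ((i + 1 + mid.length + 1 - 1 : Nat) : Int))) (-s) 0 [] m) m
                  = acc ++ pvEmit s ('(' :: List.drop (i + 1) cs) 0
              have hEnd : i + 1 + mid.length + 1 - 1 = i + mid.length + 1 := by omega
              have hlen2 : cs.length - (i + 1) = mid.length + 1 + rest.length := by
                have := congrArg List.length hsplit
                simp [List.length_drop] at this
                omega
              -- the slice is exactly mid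
              have hsub : PySem.List.slice cs (some ((i : Int) + 1)) (some ((i + 1 + mid.length + 1 - 1 : Nat) : Int)) = mid := by
                rw [hEnd]
                rw [show ((i : Int) + 1) = ((i + 1 : Nat) : Int) by push_cast; ring]
                rw [PySem.List.slice_natCast]
                rw [hsplit, show i + mid.length + 1 - (i + 1) = mid.length by omega]
                exact List.take_left' rfl
              rw [hsub]
              have hinner : pvRunA mid (-s) 0 [] m = pvEmit (-s) mid 0 := by
                rw [ih mid (-s) 0 [] (by omega) (by simpa using pvClamp_zero_of_closes mid 0 hcl0)]
                simp
              rw [hinner]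
              have hdr' : cs.drop (i + mid.length + 1 + 1) = rest := by
                rw [show i + mid.length + 1 + 1 = i + 1 + mid.length + 1 by omega]
                exact hdr
              have hrest : pvClamp rest 0 = 0 := by
                rw [hsplit] at hc
                rw [show (1 : Nat) = 0 + 1 from rfl] at hc
                rwa [pvClamp_group mid 0 rest hcl0] at hc
              rw [hEnd, ih cs s (i + mid.length + 1 + 1) _ (by omega) (by rwa [hdr'])]
              rw [hdr']
              rw [hsplit, pvEmit_lparen, show (0 : Nat) + 1 = 0 + 1 from rfl, pvEmit_group s mid 0 rest hcl0]
              simp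
            · rw [if_neg h1]
              by_cases h2 : c = ')'
              · subst h2
                rw [pvClamp_rparen] at hc
                rw [pvEmit_rparen]
                rw [if_neg (by omega)] at hc ⊢
                exact ih cs s (i + 1) acc (by omega) hc
              · rw [pvClamp_other h1 h2] at hc
                rw [pvEmit_other ha h3 h4 h1 h2]
                exact ih cs s (i + 1) acc (by omega) hc

-- ===== VERDICT (by name: the statement is the Claim_ definition above) =====
theorem solve_expression_spec : Claim_equal_solve_expression := by
  intro e s _ hpre
  unfold Spec_solve_expression solve_expression solve_expression_alt
  rw [pvFoldB_eq, pvRunA_eq e.toList.length e.toList s 0 [] (by omega) (by simpa using hpre)]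
  simp
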